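-- pv_equiv track=rewrite | github.com/AshleyChen-tech/dataStructures | practiceQuestions/simple/test3.py | max_weight_of_apples
-- ===== SOURCE A (Python) =====
-- def max_weight_of_apples(n, weights):
--     total_weight = sum(weights)
--     xor_value = 0
--
--     # 计算所有苹果重量的 XOR 值
--     for weight in weights:
--         xor_value ^= weight
--
--     # 如果 XOR 值为0，意味着可以选择所有苹果
--     if xor_value == 0:
--         return total_weight
--
--     # 动态规划来找到最大重量
--     dp = [False] * (total_weight + 1)
--     dp[0] = True  # 0重量是可以实现的
--
--     # 动态规划填充 dp 数组
--     for weight in weights: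
--         for j in range(total_weight, weight - 1, -1):
--             dp[j] = dp[j] or dp[j - weight]
--
--     # 找到能满足条件的最大重量
--     for w in range(total_weight, -1, -1):
--         if dp[w]:
--             # 计算当前总重量的 XOR 值
--             remaining_xor = xor_value ^ w
--             # 如果这个 XOR 值能在重量列表中找到，则返回当前重量
--             if remaining_xor in weights:
--                 return w
--
--     return -1  # 如果没有满足条件的重量，返回 -1
-- ===== SOURCE B (Python) =====
-- def _reachable(ws):
--     # set of all subset sums of ws, built by divide and conquer:
--     # sums(ws) = { a + b : a in sums(left half), b in sums(right half) }
--     if not ws: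
--         return {0}
--     if len(ws) == 1:
--         return {0, ws[0]}
--     mid = len(ws) // 2
--     left = _reachable(ws[:mid])
--     right = _reachable(ws[mid:])
--     return {a + b for a in left for b in right}
--
-- def max_weight_of_apples(n, weights):
--     total_weight = sum(weights)
--     xor_value = 0
--     for weight in weights:
--         xor_value ^= weight
--     if xor_value == 0:
--         return total_weight
--     reachable = _reachable(weights)
--     # any valid answer w satisfies xor_value ^ w in weights, so enumerate the
--     # candidates w = xor_value ^ r for r in weights instead of scanning all sums
--     best = -1
--     for r in weights:
--         w = xor_value ^ r
--         if w in reachable and w > best: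
--             best = w
--     return best
-- ===== Notes on version B (the rewrite author's own statement) =====
-- stated objective: alternative
-- what changed: Replaces A's in-place boolean dp array (reverse index range per weight) plus a downward scan over every candidate sum total..0 by a divide-and-conquer set of reachable subset sums ({a+b for a in sums(left half), b in sums(right half)}) and a single max-accumulating pass over the weights themselves as candidate remainders (w = xor_value ^ r), eliminating the scan over sums entirely.
-- outside the precondition, e.g. on max_weight_of_apples(0, [4, 7, 1, -1]): A returns 2, B returns -1; on max_weight_of_apples(0, [1, -1]): A returns -1, B returns 1; on max_weight_of_apples(0, [2, -1]): A raises IndexError, B returns 2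
import Mathlib
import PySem

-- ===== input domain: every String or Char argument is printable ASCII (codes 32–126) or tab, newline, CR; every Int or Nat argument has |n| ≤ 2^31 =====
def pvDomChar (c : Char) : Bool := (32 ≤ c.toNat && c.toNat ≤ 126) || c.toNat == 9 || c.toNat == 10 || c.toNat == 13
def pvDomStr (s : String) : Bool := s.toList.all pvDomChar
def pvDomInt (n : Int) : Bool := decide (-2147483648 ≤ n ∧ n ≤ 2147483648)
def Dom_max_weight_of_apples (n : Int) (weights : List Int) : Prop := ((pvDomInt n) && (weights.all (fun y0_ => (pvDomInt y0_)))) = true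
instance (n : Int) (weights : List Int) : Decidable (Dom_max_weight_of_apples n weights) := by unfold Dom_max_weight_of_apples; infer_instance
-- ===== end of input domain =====

-- B replaces A's in-place boolean DP array plus downward scan over all sums 0..total by a
-- divide-and-conquer set of reachable subset sums and a single max-accumulating pass over the
-- weights as candidate remainders (w = xor ^ r); return values only, no mutation.

-- ===== PORT A =====
def max_weight_of_apples (n : Int) (weights : List Int) : Int :=
  let total_weight := weights.sum
  let xor_value := weights.foldl PySem.Int.bxor 0
  if xor_value = 0 then total_weight
  else
    let dp0 : List Bool := PySem.List.pySetD (List.replicate (total_weight + 1).toNat false) 0 true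
    let dp := weights.foldl (fun dp weight =>
      (PySem.List.pyRange total_weight (weight - 1) (-1)).foldl
        (fun dp j => PySem.List.pySetD dp j
          (PySem.List.pyGetD dp j false || PySem.List.pyGetD dp (j - weight) false)) dp) dp0
    match (PySem.List.pyRange total_weight (-1) (-1)).foldl
      (fun acc w => match acc with
        | some r => some r
        | none =>
          if PySem.List.pyGetD dp w false then
            if PySem.Int.bxor xor_value w ∈ weights then some w else none
          else none) (none : Option Int) with
    | some w => w
    | none => -1

-- ===== PORT B =====
-- _reachable: recursion by halving; ws[:mid] / ws[mid:] with 0 ≤ mid ≤ len(ws) are exactly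
-- List.take mid / List.drop mid.
def pvReach (ws : List Int) : PySem.Set Int :=
  if _h : ws.length ≤ 1 then
    match ws with
    | [] => PySem.Set.ofList [0]
    | w :: _ => PySem.Set.ofList [0, w]
  else
    let mid := ws.length / 2
    let left := pvReach (ws.take mid)
    let right := pvReach (ws.drop mid)
    -- {a + b for a in left for b in right}: a set built from set elements (order-independent)
    PySem.Set.ofList (left.flatMap (fun a => right.map (fun b => a + b)))
termination_by ws.length
decreasing_by
  · simp only [List.length_take]; omega
  · simp only [List.length_drop]; omega

def max_weight_of_apples_alt (n : Int) (weights : List Int) : Int :=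
  let total_weight := weights.sum
  let xor_value := weights.foldl PySem.Int.bxor 0
  if xor_value = 0 then total_weight
  else
    let reachable := pvReach weights
    weights.foldl (fun best r =>
      let w := PySem.Int.bxor xor_value r
      if PySem.Set.contains reachable w && decide (best < w) then w else best) (-1)

-- ===== PRECONDITION & SPEC =====
-- Pre_ restricts to the task's natural domain: nonnegative apple weights (or XOR 0, where A
-- returns the sum before touching the dp array). With a negative weight and nonzero XOR, A's
-- dp indexing either raises IndexError or goes through Python's negative-index wraparound, an
-- accident of the array representation; B computes the natural answer there.
def Pre_max_weight_of_apples (n : Int) (weights : List Int) : Prop :=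
  weights.foldl PySem.Int.bxor 0 = 0 ∨ ∀ w ∈ weights, 0 ≤ w
instance (n : Int) (weights : List Int) : Decidable (Pre_max_weight_of_apples n weights) := by unfold Pre_max_weight_of_apples; infer_instance

def pvWitness_max_weight_of_apples : Int × List Int := (4, [2, 3, 5, 3])

def Spec_max_weight_of_apples (n : Int) (weights : List Int) (out : Int) : Prop := out = max_weight_of_apples_alt n weights
instance (n : Int) (weights : List Int) (out : Int) : Decidable (Spec_max_weight_of_apples n weights out) := by unfold Spec_max_weight_of_apples; infer_instance

-- ===== CLAIM (what is proved, stated in full; the proofs are below) =====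
def Claim_equal_max_weight_of_apples : Prop := ∀ (n : Int) (weights : List Int), Dom_max_weight_of_apples n weights → Pre_max_weight_of_apples n weights → Spec_max_weight_of_apples n weights (max_weight_of_apples n weights)

-- ===== LEMMAS AND PROOFS =====

-- subset-sum predicate: pvSS ws x ↔ x is the sum of some sub(multi)set of ws
def pvSS : List Int → Int → Prop
  | [], x => x = 0
  | w :: ws, x => pvSS ws x ∨ pvSS ws (x - w)

lemma pvSS_bounds : ∀ (ws : List Int) (x : Int), pvSS ws x → (∀ w ∈ ws, 0 ≤ w) →
    0 ≤ x ∧ x ≤ ws.sum := by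
  intro ws
  induction ws with
  | nil => intro x hx _; simp only [pvSS] at hx; simp only [List.sum_nil]; omega
  | cons w ws ih =>
    intro x hx hnn
    have hw : 0 ≤ w := hnn w List.mem_cons_self
    have hnn' : ∀ v ∈ ws, 0 ≤ v := fun v hv => hnn v (List.mem_cons_of_mem _ hv)
    simp only [List.sum_cons]
    rcases hx with h | h
    · have := ih x h hnn'; omega
    · have := ih (x - w) h hnn'; omega

lemma pvSS_append : ∀ (l r : List Int) (x : Int),
    pvSS (l ++ r) x ↔ ∃ a, pvSS l a ∧ pvSS r (x - a) := by
  intro l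
  induction l with
  | nil =>
    intro r x
    constructor
    · intro h; exact ⟨0, rfl, by simpa using h⟩
    · rintro ⟨a, ha, hr⟩; simp [pvSS] at ha; subst ha; simpa using hr
  | cons w l ih =>
    intro r x
    constructor
    · rintro (h | h)
      · obtain ⟨a, ha, hr⟩ := (ih r x).mp h
        exact ⟨a, Or.inl ha, hr⟩
      · obtain ⟨a, ha, hr⟩ := (ih r (x - w)).mp h
        refine ⟨a + w, Or.inr (by simpa using ha), ?_⟩
        have : x - (a + w) = x - w - a := by ring
        rwa [this]
    · rintro ⟨a, ha | ha, hr⟩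
      · exact Or.inl ((ih r x).mpr ⟨a, ha, hr⟩)
      · refine Or.inr ((ih r (x - w)).mpr ⟨a - w, ha, ?_⟩)
        have : x - w - (a - w) = x - a := by ring
        rwa [this]

lemma mem_pvReach_aux : ∀ (c : Nat) (ws : List Int), ws.length ≤ c →
    ∀ x, x ∈ pvReach ws ↔ pvSS ws x := by
  intro c
  induction c with
  | zero =>
    intro ws hlen x
    have : ws = [] := List.eq_nil_of_length_eq_zero (Nat.le_zero.mp hlen)
    subst this
    rw [pvReach]
    simp [PySem.Set.mem_ofList, pvSS]
  | succ c ih =>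
    intro ws hlen x
    rw [pvReach]
    by_cases h1 : ws.length ≤ 1
    · rw [dif_pos h1]
      match ws, h1 with
      | [], _ => simp [PySem.Set.mem_ofList, pvSS]
      | [w], _ => simp only [PySem.Set.mem_ofList, pvSS, List.mem_cons,
                    List.not_mem_nil, or_false]; omega
    · rw [dif_neg h1]
      have h2 : 2 ≤ ws.length := by omega
      set mid := ws.length / 2 with hmid
      have hmid1 : 1 ≤ mid := by omega
      have hmidlt : mid < ws.length := by omega
      have htake : (ws.take mid).length ≤ c := by
        rw [List.length_take]; omega
      have hdrop : (ws.drop mid).length ≤ c := by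
        rw [List.length_drop]; omega
      rw [PySem.Set.mem_ofList]
      constructor
      · intro hm
        obtain ⟨a, haL, hb⟩ := List.mem_flatMap.mp hm
        obtain ⟨b, hbR, hab⟩ := List.mem_map.mp hb
        have ha' := (ih (ws.take mid) htake a).mp haL
        have hb' := (ih (ws.drop mid) hdrop b).mp hbR
        have : pvSS (ws.take mid ++ ws.drop mid) x :=
          (pvSS_append _ _ x).mpr ⟨a, ha', by rw [← hab]; simpa using hb'⟩
        rwa [List.take_append_drop] at this
      · intro hss
        have hss' : pvSS (ws.take mid ++ ws.drop mid) x := by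
          rwa [List.take_append_drop]
        obtain ⟨a, ha, hb⟩ := (pvSS_append _ _ x).mp hss'
        refine List.mem_flatMap.mpr ⟨a, (ih (ws.take mid) htake a).mpr ha,
          List.mem_map.mpr ⟨x - a, (ih (ws.drop mid) hdrop (x - a)).mpr hb, by ring⟩⟩

lemma mem_pvReach (ws : List Int) (x : Int) : x ∈ pvReach ws ↔ pvSS ws x :=
  mem_pvReach_aux ws.length ws le_rfl x

-- membership in the set A's dp simulates: the foldl set union over the weights
lemma mem_foldSet : ∀ (ws : List Int) (s : PySem.Set Int) (x : Int),
    x ∈ ws.foldl (fun s w => PySem.Set.union s (s.map (fun y => y + w))) s ↔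
      ∃ y ∈ s, pvSS ws (x - y) := by
  intro ws
  induction ws with
  | nil =>
    intro s x
    simp only [List.foldl_nil, pvSS]
    constructor
    · intro h; exact ⟨x, h, by omega⟩
    · rintro ⟨y, hy, h⟩; have : x = y := by omega
      subst this; exact hy
  | cons w ws ih =>
    intro s x
    simp only [List.foldl_cons]
    rw [ih]
    constructor
    · rintro ⟨y, hy, hss⟩
      rcases (PySem.Set.mem_union s (s.map (fun y => y + w)) y).mp hy with h | h
      · exact ⟨y, h, Or.inl hss⟩
      · obtain ⟨z, hz, rfl⟩ := List.mem_map.mp h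
        refine ⟨z, hz, Or.inr ?_⟩
        have : x - z - w = x - (z + w) := by ring
        rwa [this]
    · rintro ⟨y, hy, hss | hss⟩
      · exact ⟨y, (PySem.Set.mem_union _ _ y).mpr (Or.inl hy), hss⟩
      · refine ⟨y + w, (PySem.Set.mem_union _ _ (y + w)).mpr
          (Or.inr (List.mem_map.mpr ⟨y, hy, rfl⟩)), ?_⟩
        have : x - (y + w) = x - y - w := by ring
        rwa [this]

lemma getD_setD_int (xs : List Bool) (j k : Int) (v d : Bool) (h0 : 0 ≤ j)
    (hj : j < (xs.length : Int)) (hk : 0 ≤ k) :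
    PySem.List.pyGetD (PySem.List.pySetD xs j v) k d = if k = j then v else PySem.List.pyGetD xs k d := by
  obtain ⟨m, rfl⟩ : ∃ m : Nat, j = (m : Int) := ⟨j.toNat, (Int.toNat_of_nonneg h0).symm⟩
  obtain ⟨m', rfl⟩ : ∃ m' : Nat, k = (m' : Int) := ⟨k.toNat, (Int.toNat_of_nonneg hk).symm⟩
  rw [PySem.List.pyGetD_pySetD_natCast xs m m' v d (by exact_mod_cast hj)]
  simp

lemma getD_replicate_false (nn : Nat) (k : Int) :
    PySem.List.pyGetD (List.replicate nn false) k false = false := by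
  cases h : PySem.List.pyIdx? nn k with
  | none => simp [PySem.List.pyGetD, PySem.List.pyGet?, h]
  | some a =>
    simp [PySem.List.pyGetD, PySem.List.pyGet?, h, List.getElem?_replicate]
    split <;> simp

lemma contains_eq_decide (s : PySem.Set Int) (k : Int) :
    PySem.Set.contains s k = decide (k ∈ s) := by
  by_cases h : k ∈ s
  · rw [decide_eq_true h, (PySem.Set.contains_iff s k).mpr h]
  · have h2 : ¬ PySem.Set.contains s k = true := fun hc => h ((PySem.Set.contains_iff s k).mp hc)
    rw [decide_eq_false h, Bool.eq_false_iff.mpr (fun hc => h2 hc)]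

lemma inner_aux (w : Int) (hw : 0 ≤ w) :
    ∀ (c : Nat) (m : Int) (dp : List Bool), m = w - 1 + c → m < (dp.length : Int) →
    (((PySem.List.pyRange m (w - 1) (-1)).foldl
        (fun dp j => PySem.List.pySetD dp j (PySem.List.pyGetD dp j false || PySem.List.pyGetD dp (j - w) false)) dp).length = dp.length
     ∧ ∀ k : Int, 0 ≤ k → k < (dp.length : Int) →
        PySem.List.pyGetD ((PySem.List.pyRange m (w - 1) (-1)).foldl
          (fun dp j => PySem.List.pySetD dp j (PySem.List.pyGetD dp j false || PySem.List.pyGetD dp (j - w) false)) dp) k false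
        = (PySem.List.pyGetD dp k false || (decide (w ≤ k ∧ k ≤ m) && PySem.List.pyGetD dp (k - w) false))) := by
  intro c
  induction c with
  | zero =>
    intro m dp hm hlen
    rw [PySem.List.pyRange_neg_one_eq_nil (by omega)]
    refine ⟨rfl, ?_⟩
    intro k hk0 hkl
    have : ¬ (w ≤ k ∧ k ≤ m) := by omega
    simp [this]
  | succ c ih =>
    intro m dp hm hlen
    have hwm : w ≤ m := by omega
    rw [PySem.List.pyRange_neg_one_cons (by omega : w - 1 < m)]
    simp only [List.foldl_cons]
    set v := (PySem.List.pyGetD dp m false || PySem.List.pyGetD dp (m - w) false) with hv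
    set dp1 := PySem.List.pySetD dp m v with hdp1
    have hlen1 : dp1.length = dp.length := PySem.List.length_pySetD dp m v
    obtain ⟨ihlen, ihget⟩ := ih (m - 1) dp1 (by omega) (by rw [hlen1]; omega)
    refine ⟨by rw [ihlen, hlen1], ?_⟩
    intro k hk0 hkl
    rw [ihget k hk0 (by rw [hlen1]; omega)]
    by_cases hkm : k = m
    · subst hkm
      have h1 : PySem.List.pyGetD dp1 k false = v :=
        by rw [hdp1, getD_setD_int dp k k v false (by omega) (by omega) hk0]; simp
      have hc : ¬ (w ≤ k ∧ k ≤ k - 1) := by omega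
      simp [h1, hv, hwm]
    · have h1 : PySem.List.pyGetD dp1 k false = PySem.List.pyGetD dp k false := by
        rw [hdp1, getD_setD_int dp m k v false (by omega) (by omega) hk0]
        simp [hkm]
      by_cases hc : w ≤ k ∧ k ≤ m - 1
      · have h2 : PySem.List.pyGetD dp1 (k - w) false = PySem.List.pyGetD dp (k - w) false := by
          rw [hdp1, getD_setD_int dp m (k - w) v false (by omega) (by omega) (by omega)]
          have : ¬ (k - w = m) := by omega
          simp [this]
        have hc' : w ≤ k ∧ k ≤ m := by omega
        simp [h1, h2, hc, hc']
      · have hc' : ¬ (w ≤ k ∧ k ≤ m) := by omega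
        simp [h1, decide_eq_false hc']
        intro hwk hkm'
        exact absurd ⟨hwk, (by omega : k ≤ m - 1)⟩ hc

lemma outer_aux (T : Int) (hT : 0 ≤ T) :
    ∀ (ws : List Int) (dp : List Bool) (s : PySem.Set Int),
    (∀ w ∈ ws, 0 ≤ w ∧ w ≤ T) → dp.length = (T + 1).toNat →
    (∀ x ∈ s, 0 ≤ x) →
    (∀ k : Int, 0 ≤ k → k ≤ T → PySem.List.pyGetD dp k false = PySem.Set.contains s k) →
    ((ws.foldl (fun dp weight =>
        (PySem.List.pyRange T (weight - 1) (-1)).foldl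
          (fun dp j => PySem.List.pySetD dp j (PySem.List.pyGetD dp j false || PySem.List.pyGetD dp (j - weight) false)) dp) dp).length = (T + 1).toNat
     ∧ (∀ x ∈ ws.foldl (fun s weight => PySem.Set.union s (s.map (fun x => x + weight))) s, 0 ≤ x)
     ∧ ∀ k : Int, 0 ≤ k → k ≤ T →
        PySem.List.pyGetD (ws.foldl (fun dp weight =>
          (PySem.List.pyRange T (weight - 1) (-1)).foldl
            (fun dp j => PySem.List.pySetD dp j (PySem.List.pyGetD dp j false || PySem.List.pyGetD dp (j - weight) false)) dp) dp) k false
        = PySem.Set.contains (ws.foldl (fun s weight => PySem.Set.union s (s.map (fun x => x + weight))) s) k) := by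
  intro ws
  induction ws with
  | nil => intro dp s _ hlen hs hmatch; exact ⟨hlen, hs, hmatch⟩
  | cons w ws ih =>
    intro dp s hws hlen hs hmatch
    obtain ⟨⟨hw0, hwT⟩, hws'⟩ : (0 ≤ w ∧ w ≤ T) ∧ ∀ x ∈ ws, 0 ≤ x ∧ x ≤ T := by
      constructor
      · exact hws w (List.mem_cons_self)
      · intro x hx; exact hws x (List.mem_cons_of_mem _ hx)
    simp only [List.foldl_cons]
    have hlenInt : (dp.length : Int) = T + 1 := by rw [hlen]; omega
    obtain ⟨ilen, iget⟩ := inner_aux w hw0 (T - (w - 1)).toNat T dp (by omega) (by omega)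
    set dp1 := (PySem.List.pyRange T (w - 1) (-1)).foldl
      (fun dp j => PySem.List.pySetD dp j (PySem.List.pyGetD dp j false || PySem.List.pyGetD dp (j - w) false)) dp with hdp1
    set s1 := PySem.Set.union s (s.map (fun x => x + w)) with hs1
    have hs1nn : ∀ x ∈ s1, 0 ≤ x := by
      intro x hx
      rcases (PySem.Set.mem_union s (s.map (fun x => x + w)) x).mp hx with h | h
      · exact hs x h
      · obtain ⟨y, hy, rfl⟩ := List.mem_map.mp h
        have := hs y hy; omega
    have hmatch1 : ∀ k : Int, 0 ≤ k → k ≤ T → PySem.List.pyGetD dp1 k false = PySem.Set.contains s1 k := by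
      intro k hk0 hkT
      rw [iget k hk0 (by omega)]
      have hmem : (k ∈ s1) ↔ (k ∈ s ∨ (k - w) ∈ s) := by
        rw [hs1, PySem.Set.mem_union]
        constructor
        · rintro (h | h)
          · exact Or.inl h
          · obtain ⟨y, hy, hyk⟩ := List.mem_map.mp h
            right; have hyw : y = k - w := by omega
            rwa [hyw] at hy
        · rintro (h | h)
          · exact Or.inl h
          · exact Or.inr (List.mem_map.mpr ⟨k - w, h, by omega⟩)
      have hcontains : PySem.Set.contains s1 k = (PySem.Set.contains s k || decide ((k - w) ∈ s)) := by
        rw [contains_eq_decide, contains_eq_decide, decide_eq_decide.mpr hmem, Bool.decide_or]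
      rw [hcontains]
      by_cases hwk : w ≤ k
      · have : k - w ≤ T := by omega
        rw [hmatch (k - w) (by omega) this]
        have hd : decide (w ≤ k ∧ k ≤ T) = true := decide_eq_true ⟨hwk, hkT⟩
        rw [hmatch k hk0 hkT, hd]
        rw [contains_eq_decide]; simp
      · have hd : decide (w ≤ k ∧ k ≤ T) = false := decide_eq_false (fun h => hwk h.1)
        have hnm : decide ((k - w) ∈ s) = false := by
          rw [decide_eq_false_iff_not]; intro hm; have := hs _ hm; omega
        rw [hmatch k hk0 hkT, hd, hnm]; simp
    exact ih dp1 s1 hws' (by rw [ilen, hlen]) hs1nn hmatch1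

-- xor facts on nonnegative ints
lemma bxor_nonneg (a b : Int) (ha : 0 ≤ a) (hb : 0 ≤ b) : 0 ≤ PySem.Int.bxor a b := by
  obtain ⟨m, rfl⟩ : ∃ m : Nat, a = (m : Int) := ⟨a.toNat, (Int.toNat_of_nonneg ha).symm⟩
  obtain ⟨k, rfl⟩ : ∃ k : Nat, b = (k : Int) := ⟨b.toNat, (Int.toNat_of_nonneg hb).symm⟩
  rw [PySem.Int.bxor_natCast]
  exact Int.natCast_nonneg _

lemma bxor_bxor_cancel (a b : Int) (ha : 0 ≤ a) (hb : 0 ≤ b) :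
    PySem.Int.bxor a (PySem.Int.bxor a b) = b := by
  obtain ⟨m, rfl⟩ : ∃ m : Nat, a = (m : Int) := ⟨a.toNat, (Int.toNat_of_nonneg ha).symm⟩
  obtain ⟨k, rfl⟩ : ∃ k : Nat, b = (k : Int) := ⟨b.toNat, (Int.toNat_of_nonneg hb).symm⟩
  rw [PySem.Int.bxor_natCast, PySem.Int.bxor_natCast]
  congr 1
  rw [← Nat.xor_assoc, Nat.xor_self, Nat.zero_xor]

lemma foldl_bxor_nonneg : ∀ (ws : List Int) (a : Int), 0 ≤ a → (∀ w ∈ ws, 0 ≤ w) →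
    0 ≤ ws.foldl PySem.Int.bxor a := by
  intro ws
  induction ws with
  | nil => intro a ha _; simpa using ha
  | cons w ws ih =>
    intro a ha hnn
    simp only [List.foldl_cons]
    exact ih _ (bxor_nonneg a w ha (hnn w List.mem_cons_self))
      (fun v hv => hnn v (List.mem_cons_of_mem _ hv))

-- A's first-hit fold over a list is List.find?
lemma foldl_scan_some (L : List Int) (q : Int → Bool) (r : Int) :
    L.foldl (fun acc w => match acc with
      | some r => some r
      | none => if q w then some w else none) (some r) = some r := by
  induction L with
  | nil => rfl
  | cons w L ih => simpa using ih

lemma foldl_scan_eq_find? (q : Int → Bool) : ∀ (L : List Int),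
    L.foldl (fun acc w => match acc with
      | some r => some r
      | none => if q w then some w else none) none = L.find? q := by
  intro L
  induction L with
  | nil => rfl
  | cons w L ih =>
    simp only [List.foldl_cons, List.find?_cons]
    cases hq : q w with
    | true => simpa [hq] using foldl_scan_some L q w
    | false => simpa [hq] using ih

-- find? on the countdown range finds the greatest satisfying value
lemma find?_countdown : ∀ (c : Nat) (T : Int) (q : Int → Bool), (T + 1).toNat = c →
    (match (PySem.List.pyRange T (-1) (-1)).find? q with
     | some m => q m = true ∧ 0 ≤ m ∧ m ≤ T ∧ ∀ v, m < v → v ≤ T → q v = false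
     | none => ∀ v, 0 ≤ v → v ≤ T → q v = false) := by
  intro c
  induction c with
  | zero =>
    intro T q hc
    rw [PySem.List.pyRange_neg_one_eq_nil (by omega : T ≤ -1)]
    simp only [List.find?_nil]
    intro v h1 h2; omega
  | succ c ih =>
    intro T q hc
    have hT : 0 ≤ T := by omega
    rw [PySem.List.pyRange_neg_one_cons (by omega : (-1 : Int) < T)]
    simp only [List.find?_cons]
    cases hq : q T with
    | true =>
      simp only []
      exact ⟨hq, hT, le_refl T, fun v h1 h2 => absurd (lt_of_lt_of_le h1 h2) (lt_irrefl T)⟩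
    | false =>
      have := ih (T - 1) q (by omega)
      simp only [] at this ⊢
      cases hf : (PySem.List.pyRange (T - 1) (-1) (-1)).find? q with
      | some m =>
        rw [hf] at this
        obtain ⟨h1, h2, h3, h4⟩ := this
        refine ⟨h1, h2, by omega, ?_⟩
        intro v hv1 hv2
        by_cases hvT : v = T
        · subst hvT; exact hq
        · exact h4 v hv1 (by omega)
      | none =>
        rw [hf] at this
        intro v hv1 hv2
        by_cases hvT : v = T
        · subst hvT; exact hq
        · exact this v hv1 (by omega)

-- B's max-accumulating fold
lemma bfold_spec (X : Int) (reach : PySem.Set Int) :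
    ∀ (ws : List Int) (b : Int),
    b ≤ ws.foldl (fun best r =>
        if PySem.Set.contains reach (PySem.Int.bxor X r) && decide (best < PySem.Int.bxor X r) then PySem.Int.bxor X r else best) b
    ∧ (ws.foldl (fun best r =>
        if PySem.Set.contains reach (PySem.Int.bxor X r) && decide (best < PySem.Int.bxor X r) then PySem.Int.bxor X r else best) b = b
       ∨ ∃ r ∈ ws, ws.foldl (fun best r =>
          if PySem.Set.contains reach (PySem.Int.bxor X r) && decide (best < PySem.Int.bxor X r) then PySem.Int.bxor X r else best) b = PySem.Int.bxor X r
          ∧ PySem.Set.contains reach (PySem.Int.bxor X r) = true)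
    ∧ ∀ r ∈ ws, PySem.Set.contains reach (PySem.Int.bxor X r) = true →
        PySem.Int.bxor X r ≤ ws.foldl (fun best r =>
          if PySem.Set.contains reach (PySem.Int.bxor X r) && decide (best < PySem.Int.bxor X r) then PySem.Int.bxor X r else best) b := by
  intro ws
  induction ws with
  | nil =>
    intro b
    refine ⟨le_refl b, Or.inl rfl, ?_⟩
    intro r hr; exact absurd hr (List.not_mem_nil)
  | cons r0 ws ih =>
    intro b
    simp only [List.foldl_cons]
    by_cases hc : (PySem.Set.contains reach (PySem.Int.bxor X r0) && decide (b < PySem.Int.bxor X r0)) = true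
    · obtain ⟨hcon, hlt⟩ := Bool.and_eq_true_iff.mp hc
      have hlt' : b < PySem.Int.bxor X r0 := of_decide_eq_true hlt
      rw [if_pos hc]
      obtain ⟨i1, i2, i3⟩ := ih (PySem.Int.bxor X r0)
      refine ⟨by omega, ?_, ?_⟩
      · rcases i2 with h | ⟨r, hr, h1, h2⟩
        · exact Or.inr ⟨r0, List.mem_cons_self, h, hcon⟩
        · exact Or.inr ⟨r, List.mem_cons_of_mem _ hr, h1, h2⟩
      · intro r hr hcr
        rcases List.mem_cons.mp hr with rfl | hr'
        · exact i1
        · exact i3 r hr' hcr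
    · rw [if_neg hc]
      obtain ⟨i1, i2, i3⟩ := ih b
      refine ⟨i1, ?_, ?_⟩
      · rcases i2 with h | ⟨r, hr, h1, h2⟩
        · exact Or.inl h
        · exact Or.inr ⟨r, List.mem_cons_of_mem _ hr, h1, h2⟩
      · intro r hr hcr
        rcases List.mem_cons.mp hr with rfl | hr'
        · by_cases hlt : b < PySem.Int.bxor X r
          · exact absurd (by rw [hcr, decide_eq_true hlt]; rfl) hc
          · omega
        · exact i3 r hr' hcr

-- the two ports agree under the precondition
lemma mwoa_eq_alt (n : Int) (weights : List Int)
    (hpre : weights.foldl PySem.Int.bxor 0 = 0 ∨ ∀ w ∈ weights, 0 ≤ w) :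
    max_weight_of_apples n weights = max_weight_of_apples_alt n weights := by
  by_cases hx : weights.foldl PySem.Int.bxor 0 = 0
  · simp [max_weight_of_apples, max_weight_of_apples_alt, hx]
  · have hnn : ∀ w ∈ weights, 0 ≤ w := hpre.resolve_left hx
    set T := weights.sum with hTdef
    set X := weights.foldl PySem.Int.bxor 0 with hXdef
    have hX0 : 0 ≤ X := foldl_bxor_nonneg weights 0 le_rfl hnn
    have hT : 0 ≤ T := List.sum_nonneg hnn
    -- dp characterisation (A side)
    set dp0 : List Bool := PySem.List.pySetD (List.replicate (T + 1).toNat false) 0 true with hdp0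
    have hlen0 : dp0.length = (T + 1).toNat := by
      rw [hdp0, PySem.List.length_pySetD, List.length_replicate]
    have hs0nn : ∀ x ∈ PySem.Set.ofList [(0 : Int)], 0 ≤ x := by
      intro x hxm
      rw [PySem.Set.mem_ofList] at hxm
      simp at hxm; omega
    have hmatch0 : ∀ k : Int, 0 ≤ k → k ≤ T →
        PySem.List.pyGetD dp0 k false = PySem.Set.contains (PySem.Set.ofList [(0 : Int)]) k := by
      intro k hk0 hkT
      rw [hdp0, getD_setD_int _ 0 k true false le_rfl
            (by rw [List.length_replicate]; omega) hk0, contains_eq_decide]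
      by_cases hk : k = 0 <;> simp [hk, getD_replicate_false, PySem.Set.mem_ofList]
    obtain ⟨flen, fnn, fmatch⟩ := outer_aux T hT weights dp0 (PySem.Set.ofList [(0 : Int)])
      (fun w hw => ⟨hnn w hw, List.single_le_sum hnn w hw⟩) hlen0 hs0nn hmatch0
    set dpF := weights.foldl (fun dp weight =>
      (PySem.List.pyRange T (weight - 1) (-1)).foldl
        (fun dp j => PySem.List.pySetD dp j
          (PySem.List.pyGetD dp j false || PySem.List.pyGetD dp (j - weight) false)) dp) dp0 with hdpF
    set sF := weights.foldl (fun s weight => PySem.Set.union s (s.map (fun x => x + weight)))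
      (PySem.Set.ofList [(0 : Int)]) with hsF
    -- reach ↔ sF ↔ pvSS
    have hreach_mem : ∀ x : Int, x ∈ pvReach weights ↔ pvSS weights x := mem_pvReach weights
    have hsF_mem : ∀ x : Int, x ∈ sF ↔ pvSS weights x := by
      intro x
      rw [hsF, mem_foldSet]
      constructor
      · rintro ⟨y, hy, h⟩
        rw [PySem.Set.mem_ofList] at hy
        simp at hy; subst hy; simpa using h
      · intro h
        exact ⟨0, by rw [PySem.Set.mem_ofList]; simp, by simpa using h⟩
    have hcon_eq : ∀ x : Int, PySem.Set.contains sF x = PySem.Set.contains (pvReach weights) x := by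
      intro x
      rw [contains_eq_decide, contains_eq_decide]
      exact decide_eq_decide.mpr ((hsF_mem x).trans (hreach_mem x).symm)
    -- the combined predicate
    set Q : Int → Bool := fun w =>
      PySem.Set.contains (pvReach weights) w && decide (PySem.Int.bxor X w ∈ weights) with hQ
    -- B's fold and its invariants
    obtain ⟨b1, b2, b3⟩ := bfold_spec X (pvReach weights) weights (-1)
    set M := weights.foldl (fun best r =>
      if PySem.Set.contains (pvReach weights) (PySem.Int.bxor X r) && decide (best < PySem.Int.bxor X r) then PySem.Int.bxor X r else best) (-1) with hM
    have hMfact : M = -1 ∨ (Q M = true ∧ 0 ≤ M ∧ M ≤ T) := by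
      rcases b2 with h | ⟨r, hr, h1, h2⟩
      · exact Or.inl h
      · right
        have hr0 : 0 ≤ r := hnn r hr
        have hMnn : 0 ≤ M := by rw [h1]; exact bxor_nonneg X r hX0 hr0
        have h2' : PySem.Set.contains (pvReach weights) M = true := by rw [h1]; exact h2
        have hinv : PySem.Int.bxor X M = r := by rw [h1]; exact bxor_bxor_cancel X r hX0 hr0
        have hmemM : M ∈ pvReach weights := (PySem.Set.contains_iff _ _).mp h2'
        have hssM : pvSS weights M := (mem_pvReach weights M).mp hmemM
        have hbM := pvSS_bounds weights M hssM hnn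
        refine ⟨?_, hMnn, hbM.2⟩
        simp only [hQ]
        rw [h2', hinv, decide_eq_true hr]; rfl
    -- the greatest valid value is what A's countdown finds, and it equals M
    have hcount := find?_countdown (T + 1).toNat T Q rfl
    have key : (match (PySem.List.pyRange T (-1) (-1)).find? Q with
        | some w => w
        | none => (-1 : Int)) = M := by
      cases hf : (PySem.List.pyRange T (-1) (-1)).find? Q with
      | some m =>
        rw [hf] at hcount
        obtain ⟨hQm, hm0, hmT, hmax⟩ := hcount
        have hmemw : PySem.Int.bxor X m ∈ weights := by
          simp only [hQ] at hQm
          exact of_decide_eq_true (Bool.and_eq_true_iff.mp hQm).2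
        have hconm : PySem.Set.contains (pvReach weights) m = true := by
          simp only [hQ] at hQm
          exact (Bool.and_eq_true_iff.mp hQm).1
        have hinv : PySem.Int.bxor X (PySem.Int.bxor X m) = m := bxor_bxor_cancel X m hX0 hm0
        have hmM : m ≤ M := by
          have := b3 (PySem.Int.bxor X m) hmemw (by rw [hinv]; exact hconm)
          rwa [hinv] at this
        rcases hMfact with h | ⟨hQM, hM0, hMT⟩
        · omega
        · show m = M
          by_contra hMm
          have hlt : m < M := lt_of_le_of_ne hmM hMm
          have := hmax M hlt hMT
          rw [this] at hQM
          exact absurd hQM (by simp)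
      | none =>
        rw [hf] at hcount
        show (-1 : Int) = M
        rcases hMfact with h | ⟨hQM, hM0, hMT⟩
        · exact h.symm
        · have := hcount M hM0 hMT
          rw [this] at hQM
          exact absurd hQM (by simp)
    -- assemble: unfold both ports and rewrite
    simp only [max_weight_of_apples, max_weight_of_apples_alt, if_neg hx, ← hTdef, ← hXdef, ← hdp0]
    rw [← hdpF]
    have hcongr : (PySem.List.pyRange T (-1) (-1)).foldl
        (fun acc w => match acc with
          | some r => some r
          | none =>
            if PySem.List.pyGetD dpF w false then
              if PySem.Int.bxor X w ∈ weights then some w else none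
            else none) (none : Option Int)
        = (PySem.List.pyRange T (-1) (-1)).foldl
        (fun acc w => match acc with
          | some r => some r
          | none => if Q w then some w else none) (none : Option Int) := by
      apply PySem.List.foldl_congr_mem
      intro acc x hxm
      cases acc with
      | some r => rfl
      | none =>
        rw [PySem.List.mem_pyRange_neg_one] at hxm
        rw [fmatch x (by omega) hxm.2, hcon_eq x]
        simp only [hQ]
        cases h1 : PySem.Set.contains (pvReach weights) x with
        | false => simp [h1]
        | true =>
          by_cases h2 : PySem.Int.bxor X x ∈ weights
          · simp [h1, h2]
          · simp [h1, h2]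
    rw [hcongr, foldl_scan_eq_find? Q, key, ← hM]

-- ===== VERDICT (by name: the statement is the Claim_ definition above) =====
theorem max_weight_of_apples_spec : Claim_equal_max_weight_of_apples := by
  intro n weights _ hpre
  unfold Spec_max_weight_of_apples
  exact mwoa_eq_alt n weights hpre
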